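-- pv_equiv track=rewrite | github.com/maxzheng/workspace-tools | workspace/scm.py | extract_commit_msgs
-- ===== SOURCE A (Python) =====
-- def extract_commit_msgs(output, is_git=True):
--     """ Returns a list of commit msgs from the given output. """
--     msgs = []
--
--     if output:
--         msg = []
--
--         for line in output.split('\n'):
--             if not line:
--                 continue
--
--             is_commit_msg = line.startswith(' ') or not line
--
--             if is_commit_msg:
--                 if is_git and line.startswith('    '):
--                     line = line[4:]
--                 msg.append(line)
--             elif msg:
--                 msgs.append('\n'.join(msg))
--                 msg = []
--
--         if msg:
--             msgs.append('\n'.join(msg))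
--
--     return msgs
-- ===== SOURCE B (Python) =====
-- def extract_commit_msgs(output, is_git=True):
--     """ Returns a list of commit msgs from the given output. """
--     if not output:
--         return []
--
--     def dedent(line):
--         return line[4:] if is_git and line.startswith('    ') else line
--
--     lines = [l for l in output.split('\n') if l]
--     msgs = []
--     i = 0
--     n = len(lines)
--     while i < n:
--         if lines[i].startswith(' '):
--             j = i
--             while j < n and lines[j].startswith(' '):
--                 j += 1
--             msgs.append('\n'.join(dedent(l) for l in lines[i:j]))
--             i = j
--         else:
--             i += 1
--     return msgs
-- ===== Notes on version B (the rewrite author's own statement) =====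
-- stated objective: alternative
-- what changed: Replaces A's single-pass accumulator-and-flush state machine with a filter-empties-first, run-scanning decomposition: scan the filtered lines, take each maximal run of indented lines as one message, no pending buffer or end-of-loop flush.
import Mathlib
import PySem

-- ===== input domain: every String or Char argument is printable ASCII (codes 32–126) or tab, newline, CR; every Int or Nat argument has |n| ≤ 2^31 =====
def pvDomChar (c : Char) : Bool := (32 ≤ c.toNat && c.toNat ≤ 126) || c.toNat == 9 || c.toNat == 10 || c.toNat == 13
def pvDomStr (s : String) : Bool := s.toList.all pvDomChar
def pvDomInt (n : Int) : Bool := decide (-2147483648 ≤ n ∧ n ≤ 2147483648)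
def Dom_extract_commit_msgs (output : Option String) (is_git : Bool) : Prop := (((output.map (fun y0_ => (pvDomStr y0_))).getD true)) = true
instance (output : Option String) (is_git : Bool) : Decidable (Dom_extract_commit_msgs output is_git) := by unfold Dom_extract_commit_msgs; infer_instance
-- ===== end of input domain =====

-- B replaces A's accumulator-and-flush state machine by a run-scanning decomposition over the
-- non-empty lines (objective: alternative, same cost).

-- ===== PORT A =====
-- the loop body of A: skip empty lines, append indented (dedented when git) lines to the pending
-- msg, flush the pending msg on a non-indented line
def pvStepA (is_git : Bool) (st : List (List Char) × List (List Char)) (line : List Char) :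
    List (List Char) × List (List Char) :=
  if line = [] then st
  else
    -- `line.startswith(' ') or not line`
    let is_commit_msg := PySem.Chars.startswith line [' '] || decide (line = [])
    if is_commit_msg then
      -- `line = line[4:]`: slice from a non-negative index = List.drop (exact)
      let line := if is_git && PySem.Chars.startswith line [' ', ' ', ' ', ' '] then line.drop 4 else line
      (st.1, st.2 ++ [line])
    else if st.2 ≠ [] then (st.1 ++ [PySem.Chars.join ['\n'] st.2], [])
    else st

def extract_commit_msgs (output : Option String) (is_git : Bool) : List String :=
  match output with
  | none => []
  | some s =>
    if s.toList = [] then []          -- `if output:` — None and '' are falsy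
    else
      let st := (PySem.Chars.splitOn s.toList ['\n']).foldl (pvStepA is_git) ([], [])
      let msgs := if st.2 ≠ [] then st.1 ++ [PySem.Chars.join ['\n'] st.2] else st.1
      msgs.map String.mk

-- ===== PORT B =====
def pvInd (l : List Char) : Bool := PySem.Chars.startswith l [' ']

def pvDedent (is_git : Bool) (l : List Char) : List Char :=
  if is_git && PySem.Chars.startswith l [' ', ' ', ' ', ' '] then l.drop 4 else l

-- Source B's while-loop: advance past non-indented lines; at an indented line take the maximal run
-- lines[i:j] (takeWhile) as one message and continue after it (dropWhile)
def pvCollect (is_git : Bool) : List (List Char) → List (List Char)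
  | [] => []
  | l :: ls =>
    if pvInd l then
      PySem.Chars.join ['\n'] ((l :: ls.takeWhile pvInd).map (pvDedent is_git))
        :: pvCollect is_git (ls.dropWhile pvInd)
    else pvCollect is_git ls
termination_by ls => ls.length
decreasing_by
  · simpa using Nat.lt_succ_of_le (List.length_dropWhile_le _ _)
  · simp

def extract_commit_msgs_alt (output : Option String) (is_git : Bool) : List String :=
  match output with
  | none => []
  | some s =>
    if s.toList = [] then []          -- `if not output: return []`
    else
      (pvCollect is_git
        (((PySem.Chars.splitOn s.toList ['\n']).filter (fun l => !l.isEmpty)))).map String.mk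

-- ===== PRECONDITION & SPEC =====
def Spec_extract_commit_msgs (output : Option String) (is_git : Bool) (out : List String) : Prop := out = extract_commit_msgs_alt output is_git
instance (output : Option String) (is_git : Bool) (out : List String) : Decidable (Spec_extract_commit_msgs output is_git out) := by unfold Spec_extract_commit_msgs; infer_instance

-- ===== CLAIM (what is proved, stated in full; the proofs are below) =====
def Claim_equal_extract_commit_msgs : Prop := ∀ (output : Option String) (is_git : Bool), Dom_extract_commit_msgs output is_git → Spec_extract_commit_msgs output is_git (extract_commit_msgs output is_git)

-- ===== LEMMAS AND PROOFS =====

-- the result A's loop produces from state (msgs, msg) on the remaining non-empty lines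
def pvSpec (is_git : Bool) (acc : List (List Char)) : List (List Char) → List (List Char)
  | [] => if acc = [] then [] else [PySem.Chars.join ['\n'] acc]
  | l :: ls =>
    if pvInd l then pvSpec is_git (acc ++ [pvDedent is_git l]) ls
    else (if acc = [] then [] else [PySem.Chars.join ['\n'] acc]) ++ pvSpec is_git [] ls

-- A's final flush of the loop state
def pvFin (st : List (List Char) × List (List Char)) : List (List Char) :=
  if st.2 ≠ [] then st.1 ++ [PySem.Chars.join ['\n'] st.2] else st.1

lemma pvFoldA_filter (g : Bool) (ls : List (List Char)) : ∀ st,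
    ls.foldl (pvStepA g) st = (ls.filter (fun l => !l.isEmpty)).foldl (pvStepA g) st := by
  induction ls with
  | nil => intro st; rfl
  | cons l ls ih =>
    intro st
    by_cases h : l = []
    · subst h; simpa [pvStepA] using ih st
    · simp [List.filter_cons, h, List.isEmpty_iff, List.foldl_cons, ih]

lemma pvFoldA_spec (g : Bool) (ls : List (List Char)) (h : ∀ l ∈ ls, l ≠ []) : ∀ msgs msg,
    pvFin (ls.foldl (pvStepA g) (msgs, msg)) = msgs ++ pvSpec g msg ls := by
  induction ls with
  | nil =>
    intro msgs msg
    by_cases hm : msg = [] <;> simp [pvFin, pvSpec, hm]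
  | cons l ls ih =>
    intro msgs msg
    have hl : l ≠ [] := h l (by simp)
    have h' : ∀ l' ∈ ls, l' ≠ [] := fun l' hl' => h l' (by simp [hl'])
    by_cases hi : pvInd l
    · have : pvStepA g (msgs, msg) l = (msgs, msg ++ [pvDedent g l]) := by
        simp [pvStepA, hl, pvInd] at hi ⊢
        simp [hi, pvDedent]
      simp [List.foldl_cons, this, ih h', pvSpec, hi]
    · by_cases hm : msg = []
      · subst hm
        have hstep : pvStepA g (msgs, []) l = (msgs, []) := by
          simp [pvStepA, hl, pvInd] at hi ⊢
          simp [hi]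
        rw [List.foldl_cons, hstep, ih h']
        simp [pvSpec, hi]
      · have : pvStepA g (msgs, msg) l = (msgs ++ [PySem.Chars.join ['\n'] msg], []) := by
          simp [pvStepA, hl, pvInd] at hi ⊢
          simp [hi, hm]
        simp [List.foldl_cons, this, ih h', pvSpec, hi, hm]

lemma pvSpec_collect (g : Bool) (ls : List (List Char)) : ∀ acc,
    pvSpec g acc ls =
      if acc = [] then pvCollect g ls
      else PySem.Chars.join ['\n'] (acc ++ (ls.takeWhile pvInd).map (pvDedent g))
            :: pvCollect g (ls.dropWhile pvInd) := by
  induction ls with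
  | nil =>
    intro acc
    by_cases hm : acc = [] <;> simp [pvSpec, pvCollect, hm]
  | cons l ls ih =>
    intro acc
    by_cases hi : pvInd l
    · have hne : acc ++ [pvDedent g l] ≠ [] := by simp
      by_cases hm : acc = [] <;>
        simp [pvSpec, hi, ih, hm, pvCollect, List.takeWhile_cons, List.dropWhile_cons]
    · by_cases hm : acc = [] <;>
        simp [pvSpec, hi, ih, hm, pvCollect, List.takeWhile_cons, List.dropWhile_cons]

-- ===== VERDICT (by name: the statement is the Claim_ definition above) =====
theorem extract_commit_msgs_spec : Claim_equal_extract_commit_msgs := by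
  intro output is_git _
  unfold Spec_extract_commit_msgs extract_commit_msgs extract_commit_msgs_alt
  cases output with
  | none => rfl
  | some s =>
    by_cases hs : s.toList = []
    · simp [hs]
    · simp only [hs, if_false]
      have hfilter := pvFoldA_filter is_git (PySem.Chars.splitOn s.toList ['\n']) (([], []))
      have hne : ∀ l ∈ (PySem.Chars.splitOn s.toList ['\n']).filter (fun l => !l.isEmpty), l ≠ [] := by
        intro l hl
        have := List.of_mem_filter hl
        simpa [List.isEmpty_iff] using this
      have h2 := pvFoldA_spec is_git _ hne ([]) ([])
      have h3 := pvSpec_collect is_git ((PySem.Chars.splitOn s.toList ['\n']).filter (fun l => !l.isEmpty)) ([])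
      simp only [pvFin] at h2
      simp [hfilter, h2, h3]
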